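-- pv_equiv track=rewrite | github.com/arechesk/cf | python/1659.A.py | f
-- ===== SOURCE A (Python) =====
-- def f(n,r,b):
--     k=r/(b+1)
--     s=""
--     while b>0:
--         k=int(r/(b+1))
--         for i in range(k):
--             s+="R"
--         s+="B"
--         r-=k
--         b-=1
--     for i in range(r):
--         s+="R"
--     return s
-- ===== SOURCE B (Python) =====
-- def f(n, r, b):
--     # closed-form even distribution: q R's in the first b+1-rem gaps, q+1 in the last rem
--     if b <= 0:
--         return "R" * max(r, 0)
--     rr = max(r, 0)
--     q, rem = divmod(rr, b + 1)
--     segs = ["R" * q] * (b + 1 - rem) + ["R" * (q + 1)] * rem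
--     return "B".join(segs)
-- ===== Notes on version B (the rewrite author's own statement) =====
-- stated objective: faster
-- what changed: Replaced A's character-by-character while-loop (recomputing int(r/(b+1)) each round and appending single 'R's) with a closed form: one divmod gives q and rem, the b+1 gap strings are built by string multiplication and joined with 'B'.
import Mathlib
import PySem

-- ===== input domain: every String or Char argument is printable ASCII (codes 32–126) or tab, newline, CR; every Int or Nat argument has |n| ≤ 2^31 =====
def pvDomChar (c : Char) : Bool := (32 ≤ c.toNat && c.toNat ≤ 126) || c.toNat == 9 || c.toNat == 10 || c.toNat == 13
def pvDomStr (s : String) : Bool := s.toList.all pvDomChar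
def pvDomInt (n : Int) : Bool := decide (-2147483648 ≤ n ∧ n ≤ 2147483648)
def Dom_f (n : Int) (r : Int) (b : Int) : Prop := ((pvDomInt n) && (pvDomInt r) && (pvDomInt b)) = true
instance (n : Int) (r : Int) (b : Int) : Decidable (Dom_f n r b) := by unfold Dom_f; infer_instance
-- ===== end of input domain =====

-- B replaces A's character-appending while-loop by one divmod and a join of the b+1 gap strings (simpler).

-- ===== PORT A =====
-- A's while loop: state is (r, b, s); int(r/(b+1)) is exact float division followed by
-- int() truncation, which on |r|, |b| ≤ 2^31 equals truncating integer division (Int.tdiv)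
def fGo (r : Int) (b : Int) (s : List Char) : List Char :=
  if 0 < b then
    let k := Int.tdiv r (b + 1)
    fGo (r - k) (b - 1) (s ++ List.replicate k.toNat 'R' ++ ['B'])
  else
    s ++ List.replicate r.toNat 'R'
termination_by b.toNat
decreasing_by omega

def f (n : Int) (r : Int) (b : Int) : String :=
  -- first line 'k = r/(b+1)': value unused; it raises ZeroDivisionError iff b = -1 (excluded by Pre_f)
  String.ofList (fGo r b [])

-- ===== PORT B =====
def f_alt (n : Int) (r : Int) (b : Int) : String :=
  if b ≤ 0 then
    String.ofList (List.replicate (max r 0).toNat 'R')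
  else
    let rr := max r 0
    let q := PySem.Int.floordiv rr (b + 1)
    let rem := PySem.Int.mod rr (b + 1)
    let segs := List.replicate (b + 1 - rem).toNat (String.ofList (List.replicate q.toNat 'R'))
             ++ List.replicate rem.toNat (String.ofList (List.replicate (q + 1).toNat 'R'))
    PySem.Str.join "B" segs

-- ===== PRECONDITION & SPEC =====
-- Pre_f excludes exactly b = -1, where A's first line r/(b+1) raises ZeroDivisionError.
def Pre_f (n : Int) (r : Int) (b : Int) : Prop := b ≠ -1
instance (n : Int) (r : Int) (b : Int) : Decidable (Pre_f n r b) := by unfold Pre_f; infer_instance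
def pvWitness_f : Int × Int × Int := (0, 7, 3)

def Spec_f (n : Int) (r : Int) (b : Int) (out : String) : Prop := out = f_alt n r b
instance (n : Int) (r : Int) (b : Int) (out : String) : Decidable (Spec_f n r b out) := by unfold Spec_f; infer_instance

-- ===== CLAIM (what is proved, stated in full; the proofs are below) =====
def Claim_equal_f : Prop := ∀ (n : Int) (r : Int) (b : Int), Dom_f n r b → Pre_f n r b → Spec_f n r b (f n r b)

-- ===== LEMMAS AND PROOFS =====

-- functional model of A's while loop (fuel = b)
def modelA : Nat → Int → List Char
  | 0, r => List.replicate r.toNat 'R'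
  | m + 1, r =>
    let k := Int.tdiv r ((m : Int) + 2)
    List.replicate k.toNat 'R' ++ 'B' :: modelA m (r - k)

theorem fGo_eq_modelA : ∀ (m : Nat) (b r : Int) (s : List Char), b.toNat = m →
    fGo r b s = s ++ modelA m r := by
  intro m
  induction m with
  | zero =>
    intro b r s hb
    rw [fGo]
    simp only [modelA]
    rw [if_neg (by omega)]
  | succ m ih =>
    intro b r s hb
    rw [fGo, if_pos (by omega)]
    rw [ih (b - 1) _ _ (by omega)]
    simp only [modelA]
    have : b + 1 = (m : Int) + 2 := by omega
    rw [this]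
    simp [List.append_assoc]

-- join of a nonempty list, cons form
theorem join_cons_ne_nil (sep p : List Char) (l : List (List Char)) (h : l ≠ []) :
    PySem.Chars.join sep (p :: l) = p ++ sep ++ PySem.Chars.join sep l := by
  cases l with
  | nil => exact absurd rfl h
  | cons q t => exact PySem.Chars.join_cons_cons sep p q t

-- a join of m+1 empty gaps is m separators
theorem join_B_replicate_nil : ∀ (m : Nat),
    PySem.Chars.join ['B'] (List.replicate (m + 1) []) = List.replicate m 'B' := by
  intro m
  induction m with
  | zero => simp [PySem.Chars.join_singleton]
  | succ m ih =>
    rw [show (m + 1 + 1 : Nat) = (m + 1) + 1 from rfl, List.replicate_succ,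
      join_cons_ne_nil _ _ _ (by simp), ih]
    simp [List.replicate_succ]

-- A's loop on nonpositive r: every quotient is nonpositive, no 'R' is ever emitted
theorem modelA_nonpos : ∀ (m : Nat) (r : Int), r ≤ 0 →
    modelA m r = PySem.Chars.join ['B'] (List.replicate (m + 1) []) := by
  intro m
  induction m with
  | zero =>
    intro r hr
    simp [modelA, PySem.Chars.join_singleton, Int.toNat_of_nonpos hr]
  | succ m ih =>
    intro r hr
    have hk : Int.tdiv r ((m : Int) + 2) ≤ 0 := by
      have h1 : Int.tdiv (-r) ((m : Int) + 2) = (-r) / ((m : Int) + 2) :=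
        Int.tdiv_eq_ediv_of_nonneg (by omega)
      have h2 : 0 ≤ (-r) / ((m : Int) + 2) := Int.ediv_nonneg (by omega) (by omega)
      have h3 : Int.tdiv (-r) ((m : Int) + 2) = -Int.tdiv r ((m : Int) + 2) := Int.neg_tdiv r _
      omega
    have hge : r ≤ Int.tdiv r ((m : Int) + 2) := by
      have h1 : Int.tdiv (-r) ((m : Int) + 2) = (-r) / ((m : Int) + 2) :=
        Int.tdiv_eq_ediv_of_nonneg (by omega)
      have h2 : (-r) / ((m : Int) + 2) ≤ -r := Int.ediv_le_self _ (by omega)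
      have h3 : Int.tdiv (-r) ((m : Int) + 2) = -Int.tdiv r ((m : Int) + 2) := Int.neg_tdiv r _
      omega
    simp only [modelA]
    rw [ih (r - Int.tdiv r ((m : Int) + 2)) (by omega)]
    rw [Int.toNat_of_nonpos hk, join_B_replicate_nil, join_B_replicate_nil]
    simp [List.replicate_succ]

-- the segment list B builds, at the List Char level (m+1 gaps, intended for 0 ≤ r)
def segsOf (m : Nat) (r : Int) : List (List Char) :=
  List.replicate ((m + 1) - (r % ((m : Int) + 1)).toNat) (List.replicate (r / ((m : Int) + 1)).toNat 'R')
    ++ List.replicate (r % ((m : Int) + 1)).toNat (List.replicate ((r / ((m : Int) + 1)).toNat + 1) 'R')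

theorem segsOf_ne_nil (m : Nat) (r : Int) : segsOf m r ≠ [] := by
  unfold segsOf
  intro h
  have hr : (0:Int) < (m : Int) + 1 := by omega
  have h1 := Int.emod_lt_of_pos r hr
  have h2 := Int.emod_nonneg r (by omega : ((m : Int) + 1) ≠ 0)
  simp only [List.append_eq_nil_iff, List.replicate_eq_nil_iff] at h
  omega

-- A's greedy loop distributes r evenly: q 'R's in the first gaps, q+1 in the last r % (b+1)
theorem modelA_nonneg : ∀ (m : Nat) (r : Int), 0 ≤ r →
    modelA m r = PySem.Chars.join ['B'] (segsOf m r) := by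
  intro m
  induction m with
  | zero =>
    intro r hr
    simp [modelA, segsOf, PySem.Chars.join_singleton]
  | succ m ih =>
    intro r hr
    have hd : (0 : Int) < (m : Int) + 2 := by omega
    set q := r / ((m : Int) + 2) with hq
    set rem := r % ((m : Int) + 2) with hrem
    have hk : Int.tdiv r ((m : Int) + 2) = q := Int.tdiv_eq_ediv_of_nonneg hr
    have hql : ((m : Int) + 2) * q + rem = r := by
      rw [hq, hrem]; exact Int.mul_ediv_add_emod r _
    have hrem0 : 0 ≤ rem := Int.emod_nonneg r (by omega)
    have hremlt : rem < (m : Int) + 2 := Int.emod_lt_of_pos r hd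
    have hq0 : 0 ≤ q := Int.ediv_nonneg hr (by omega)
    have hr' : 0 ≤ r - q := by nlinarith
    have hcast : ((m + 1 : Nat) : Int) + 1 = (m : Int) + 2 := by push_cast; ring
    simp only [modelA, hk]
    rw [ih (r - q) hr']
    by_cases hcase : rem ≤ (m : Int)
    · -- remaining r-q over m+1 gaps: same quotient, same remainder
      have hdq : (r - q) / ((m : Int) + 1) = q ∧ (r - q) % ((m : Int) + 1) = rem :=
        (Int.ediv_emod_unique (by omega)).2 ⟨by linarith, hrem0, by omega⟩
      have hsegs : segsOf (m + 1) r = List.replicate q.toNat 'R' :: segsOf m (r - q) := by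
        unfold segsOf
        rw [hcast, hdq.1, hdq.2, ← hq, ← hrem]
        have hc : (m + 1 + 1) - rem.toNat = ((m + 1) - rem.toNat) + 1 := by omega
        rw [hc, List.replicate_succ]
        simp
      rw [hsegs, join_cons_ne_nil _ _ _ (segsOf_ne_nil m (r - q))]
      simp
    · -- rem = m+1: the single short gap comes first, all remaining gaps get q+1
      have hrm : rem = (m : Int) + 1 := by omega
      have hdq : (r - q) / ((m : Int) + 1) = q + 1 ∧ (r - q) % ((m : Int) + 1) = 0 :=
        (Int.ediv_emod_unique (by omega)).2 ⟨by nlinarith, le_refl 0, by omega⟩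
      have hsegs : segsOf (m + 1) r = List.replicate q.toNat 'R' :: segsOf m (r - q) := by
        unfold segsOf
        rw [hcast, hdq.1, hdq.2, ← hq, ← hrem, hrm]
        have h1 : ((m + 1 + 1) - ((m : Int) + 1).toNat) = 1 := by omega
        have h2 : ((m : Int) + 1).toNat = m + 1 := by omega
        have h3 : (q + 1).toNat = q.toNat + 1 := by omega
        rw [h1, h2, h3]
        simp [List.replicate_succ]
      rw [hsegs, join_cons_ne_nil _ _ _ (segsOf_ne_nil m (r - q))]
      simp

-- ===== VERDICT (by name: the statement is the Claim_ definition above) =====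
theorem f_spec : Claim_equal_f := by
  intro n r b _ hpre
  unfold Spec_f f f_alt
  by_cases hb : b ≤ 0
  · -- loop skipped on both sides
    rw [if_pos hb, fGo_eq_modelA 0 b r [] (by omega)]
    simp only [modelA, List.nil_append]
    have : r.toNat = (max r 0).toNat := by omega
    rw [this]
  · rw [if_neg hb]
    obtain ⟨m, hm⟩ : ∃ m : Nat, b = (m : Int) + 1 := ⟨(b - 1).toNat, by omega⟩
    have hb1 : (0 : Int) < b + 1 := by omega
    rw [fGo_eq_modelA (m + 1) b r [] (by omega), List.nil_append]
    simp only [PySem.Int.floordiv_eq_ediv_of_pos hb1, PySem.Int.mod_eq_emod_of_pos hb1]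
    have hbm : b + 1 = (m : Int) + 2 := by omega
    by_cases hr : 0 ≤ r
    · have hmax : max r 0 = r := by omega
      rw [modelA_nonneg (m + 1) r hr]
      apply String.ext
      rw [PySem.Str.toList_join]
      simp only [hmax, List.map_append, List.map_replicate, String.toList_ofList]
      unfold segsOf
      have hcast : ((m + 1 : Nat) : Int) + 1 = (m : Int) + 2 := by push_cast; ring
      rw [hcast, hbm]
      have h0 : 0 ≤ r % ((m : Int) + 2) := Int.emod_nonneg _ (by omega)
      have h1 : r % ((m : Int) + 2) < (m : Int) + 2 := Int.emod_lt_of_pos _ (by omega)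
      have h2 : 0 ≤ r / ((m : Int) + 2) := Int.ediv_nonneg hr (by omega)
      have hc1 : ((m : Int) + 2 - r % ((m : Int) + 2)).toNat = (m + 1 + 1) - (r % ((m : Int) + 2)).toNat := by
        omega
      have hc2 : (r / ((m : Int) + 2) + 1).toNat = (r / ((m : Int) + 2)).toNat + 1 := by omega
      rw [hc1, hc2]
      simp
    · have hmax : max r 0 = 0 := by omega
      rw [modelA_nonpos (m + 1) r (by omega)]
      apply String.ext
      rw [PySem.Str.toList_join]
      simp only [hmax, Int.zero_ediv, Int.zero_emod, Int.sub_zero, Int.toNat_zero,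
        List.replicate_zero, List.append_nil, List.map_replicate, String.toList_ofList]
      rw [show (b + 1).toNat = m + 1 + 1 by omega, join_B_replicate_nil]
      simp [join_B_replicate_nil]
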